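-- pv_equiv track=rewrite | github.com/IvayloValkov/Python_Fundamentals | Functions/10_array_manipulator.py | max_even
-- ===== SOURCE A (Python) =====
-- def max_even(array):
--     max_int = min(array)
--     index = -1
--
--     for i in range(0, len(array)):
--         if array[i] >= max_int and array[i] % 2 == 0:
--             max_int = array[i]
--             index = i
--
--     return index
-- ===== SOURCE B (Python) =====
-- def max_even(array):
--     evens = [x for x in array if x % 2 == 0]
--     if not evens:
--         return -1
--     m = max(evens)
--     for i in range(len(array) - 1, -1, -1):
--         if array[i] == m:
--             return i
-- ===== Notes on version B (the rewrite author's own statement) =====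
-- stated objective: alternative
-- what changed: Replaces A's single fused forward pass (running max-even with index, seeded by min(array)) with a reduce-then-reverse-scan: take max of the even elements, then scan backwards for its last index.
import Mathlib
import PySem

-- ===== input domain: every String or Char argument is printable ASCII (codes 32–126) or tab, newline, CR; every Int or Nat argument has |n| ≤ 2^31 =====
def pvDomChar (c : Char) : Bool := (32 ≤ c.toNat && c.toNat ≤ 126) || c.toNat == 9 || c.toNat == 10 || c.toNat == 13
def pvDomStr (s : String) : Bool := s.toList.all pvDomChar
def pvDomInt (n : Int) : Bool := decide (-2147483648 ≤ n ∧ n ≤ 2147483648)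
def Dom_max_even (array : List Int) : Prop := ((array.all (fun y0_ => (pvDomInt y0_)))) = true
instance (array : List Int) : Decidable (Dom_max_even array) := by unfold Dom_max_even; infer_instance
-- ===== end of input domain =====

-- B replaces A's fused forward pass with a reduce-then-reverse-scan (max of the evens, then its last index);
-- on the empty list A raises ValueError (min([])), so Pre_ excludes it (return-value equivalence only).

-- ===== PORT A =====
-- loop body of A's 'for i in range(0, len(array))'
def stepA (array : List Int) (st : Int × Int) (i : Int) : Int × Int :=
  let x := PySem.List.pyGetD array i 0
  if st.1 ≤ x ∧ PySem.Int.mod x 2 = 0 then (x, i) else st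

def max_even (array : List Int) : Int :=
  match PySem.List.min? array (fun y => y) with
  | none => -1  -- unreachable under Pre_: Python raises ValueError here
  | some m0 =>
      ((PySem.List.pyRange 0 (array.length : Int) 1).foldl (stepA array) (m0, -1)).2

-- ===== PORT B =====
-- B's reverse scan 'for i in range(len(array)-1, -1, -1): if array[i] == m: return i'
def findLastAux (array : List Int) (m : Int) : List Int → Int
  | [] => -1  -- unreachable when m ∈ array
  | i :: rest =>
      if PySem.List.pyGetD array i 0 = m then i else findLastAux array m rest

def max_even_alt (array : List Int) : Int :=
  match PySem.List.max? (array.filter (fun x => PySem.Int.mod x 2 == 0)) (fun y => y) with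
  | none => -1
  | some m => findLastAux array m (PySem.List.pyRange ((array.length : Int) - 1) (-1) (-1))

-- ===== PRECONDITION & SPEC =====
-- Pre_ excludes only the empty list, on which A raises ValueError (min of an empty sequence).
def Pre_max_even (array : List Int) : Prop := array ≠ []
instance (array : List Int) : Decidable (Pre_max_even array) := by unfold Pre_max_even; infer_instance
def pvWitness_max_even : List Int := ([2, 3, 4])

def Spec_max_even (array : List Int) (out : Int) : Prop := out = max_even_alt array
instance (array : List Int) (out : Int) : Decidable (Spec_max_even array out) := by unfold Spec_max_even; infer_instance

-- ===== CLAIM (what is proved, stated in full; the proofs are below) =====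
def Claim_equal_max_even : Prop := ∀ (array : List Int), Dom_max_even array → Pre_max_even array → Spec_max_even array (max_even array)

-- ===== LEMMAS AND PROOFS =====

-- last index of m in xs, or -1: the common characterisation of both results
def lastIdx (xs : List Int) (m : Int) : Int :=
  match List.findIdx? (fun y => y == m) xs.reverse with
  | none => -1
  | some k => (xs.length : Int) - 1 - (k : Int)

theorem lastIdx_append (xs : List Int) (x m : Int) :
    lastIdx (xs ++ [x]) m = if x = m then (xs.length : Int) else lastIdx xs m := by
  unfold lastIdx
  rw [List.reverse_append]
  simp only [List.reverse_singleton, List.singleton_append, List.findIdx?_cons]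
  by_cases h : x = m
  · simp [h]
  · simp only [beq_iff_eq, h, if_false]
    cases hf : List.findIdx? (fun y => y == m) xs.reverse <;> simp [List.length_append]
    ring

theorem pyGetD_concat_left (xs : List Int) (x i : Int) (h0 : 0 ≤ i) (h1 : i < (xs.length : Int)) :
    PySem.List.pyGetD (xs ++ [x]) i 0 = PySem.List.pyGetD xs i 0 := by
  rw [PySem.List.pyGetD_eq_getElem _ _ h0 (by simp; omega),
      PySem.List.pyGetD_eq_getElem _ _ h0 h1,
      List.getElem_append_left (by omega)]

theorem pyGetD_concat_length (xs : List Int) (x : Int) :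
    PySem.List.pyGetD (xs ++ [x]) (xs.length : Int) 0 = x := by
  rw [PySem.List.pyGetD_eq_getElem _ _ (by positivity) (by simp)]
  simp

theorem foldA_append (xs : List Int) (x : Int) (init : Int × Int) :
    (PySem.List.pyRange 0 ((xs ++ [x]).length : Int) 1).foldl (stepA (xs ++ [x])) init
    = (let s := (PySem.List.pyRange 0 (xs.length : Int) 1).foldl (stepA xs) init
       if s.1 ≤ x ∧ PySem.Int.mod x 2 = 0 then (x, (xs.length : Int)) else s) := by
  have hlen : (((xs ++ [x]).length : Nat) : Int) = (xs.length : Int) + 1 := by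
    simp
  rw [hlen, PySem.List.pyRange_one_succ_right (by positivity), List.foldl_append]
  rw [PySem.List.foldl_congr_mem _ (stepA (xs ++ [x])) (stepA xs) init
      (by
        intro acc i hi
        obtain ⟨h0, h1⟩ := (PySem.List.mem_pyRange_one).mp hi
        unfold stepA
        rw [pyGetD_concat_left xs x i h0 h1])]
  simp only [List.foldl_cons, List.foldl_nil]
  unfold stepA
  rw [pyGetD_concat_length]

theorem maxq_append (l : List Int) (x : Int) :
    PySem.List.max? (l ++ [x]) (fun y => y)
    = some (match PySem.List.max? l (fun y => y) with | none => x | some m => max m x) := by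
  cases l with
  | nil =>
    have h0 : PySem.List.max? ([] : List Int) (fun y => y) = none :=
      (PySem.List.max?_eq_none_iff _ _).mpr rfl
    simp [h0, PySem.List.max?_id_cons]
  | cons y t =>
    rw [List.cons_append, PySem.List.max?_id_cons, PySem.List.max?_id_cons]
    simp [List.foldl_append]

theorem A_inv (xs : List Int) (m0 : Int) (h : ∀ y ∈ xs, m0 ≤ y) :
    (PySem.List.pyRange 0 (xs.length : Int) 1).foldl (stepA xs) (m0, -1)
    = (match PySem.List.max? (xs.filter (fun x => PySem.Int.mod x 2 == 0)) (fun y => y) with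
       | none => (m0, -1)
       | some m => (m, lastIdx xs m)) := by
  induction xs using List.reverseRecOn with
  | nil =>
    have h0 : PySem.List.max? ([] : List Int) (fun y => y) = none :=
      (PySem.List.max?_eq_none_iff _ _).mpr rfl
    simp [PySem.List.pyRange_one_eq_nil, h0]
  | append_singleton xs x ih =>
    rw [foldA_append, ih (fun y hy => h y (List.mem_append_left _ hy)),
        List.filter_append]
    have hx : m0 ≤ x := h x (by simp)
    by_cases he : PySem.Int.mod x 2 = 0
    · have hbe : (PySem.Int.mod x 2 == 0) = true := beq_iff_eq.mpr he
      have hfx : List.filter (fun y => PySem.Int.mod y 2 == 0) [x] = [x] := by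
        simp only [List.filter_cons, List.filter_nil, hbe, if_true]
      rw [hfx, maxq_append]
      cases hM : PySem.List.max? (xs.filter (fun y => PySem.Int.mod y 2 == 0)) (fun y => y) with
      | none =>
        dsimp only
        rw [if_pos ⟨hx, he⟩, lastIdx_append, if_pos rfl]
      | some m =>
        dsimp only
        by_cases hmx : m ≤ x
        · rw [if_pos ⟨hmx, he⟩, max_eq_right hmx, lastIdx_append, if_pos rfl]
        · have hxm : x ≠ m := fun hh => hmx (le_of_eq hh.symm)
          rw [if_neg (fun hc => hmx hc.1), max_eq_left (le_of_not_ge hmx),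
              lastIdx_append, if_neg hxm]
    · have hbe : (PySem.Int.mod x 2 == 0) = false := by
        simpa using he
      have hfx : List.filter (fun y => PySem.Int.mod y 2 == 0) [x] = [] := by
        simp only [List.filter_cons, List.filter_nil, hbe, Bool.false_eq_true, if_false]
      rw [hfx, List.append_nil]
      cases hM : PySem.List.max? (xs.filter (fun y => PySem.Int.mod y 2 == 0)) (fun y => y) with
      | none =>
        dsimp only
        rw [if_neg (fun hc => he hc.2)]
      | some m =>
        have hmf : PySem.Int.mod m 2 = 0 := by
          have := (List.mem_filter.mp (PySem.List.max?_mem hM)).2; simpa using this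
        have hxm : x ≠ m := fun hh => he (hh ▸ hmf)
        dsimp only
        rw [if_neg (fun hc => he hc.2), lastIdx_append, if_neg hxm]

theorem findLastAux_congr (xs : List Int) (x m : Int) (idxs : List Int)
    (h : ∀ i ∈ idxs, 0 ≤ i ∧ i < (xs.length : Int)) :
    findLastAux (xs ++ [x]) m idxs = findLastAux xs m idxs := by
  induction idxs with
  | nil => rfl
  | cons i rest ih =>
    obtain ⟨h0, h1⟩ := h i (by simp)
    unfold findLastAux
    rw [pyGetD_concat_left xs x i h0 h1, ih (fun j hj => h j (by simp [hj]))]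

theorem B_scan (xs : List Int) (m : Int) (hm : m ∈ xs) :
    findLastAux xs m (PySem.List.pyRange ((xs.length : Int) - 1) (-1) (-1)) = lastIdx xs m := by
  induction xs using List.reverseRecOn with
  | nil => simp at hm
  | append_singleton xs x ih =>
    have hlen : (((xs ++ [x]).length : Nat) : Int) - 1 = (xs.length : Int) := by simp
    rw [hlen, PySem.List.pyRange_neg_one_cons (by omega)]
    unfold findLastAux
    rw [pyGetD_concat_length, lastIdx_append]
    by_cases hxm : x = m
    · simp [hxm]
    · rw [if_neg hxm, if_neg hxm,
          findLastAux_congr xs x m _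
            (fun i hi => by
              obtain ⟨h0, h1⟩ := (PySem.List.mem_pyRange_neg_one).mp hi
              exact ⟨by omega, by omega⟩)]
      have hm' : m ∈ xs := by
        rcases List.mem_append.mp hm with h' | h'
        · exact h'
        · simp at h'; exact absurd h'.symm hxm
      exact ih hm'

-- ===== VERDICT (by name: the statement is the Claim_ definition above) =====
theorem max_even_spec : Claim_equal_max_even := by
  intro array _ hpre
  unfold Spec_max_even max_even max_even_alt
  cases hmin : PySem.List.min? array (fun y => y) with
  | none => exact absurd ((PySem.List.min?_eq_none_iff _ _).mp hmin) hpre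
  | some m0 =>
    dsimp only
    rw [A_inv array m0 (PySem.List.min?_isMin hmin)]
    cases hM : PySem.List.max? (array.filter (fun x => PySem.Int.mod x 2 == 0)) (fun y => y) with
    | none => simp
    | some m =>
      have hm : m ∈ array := (List.mem_filter.mp (PySem.List.max?_mem hM)).1
      simp [(B_scan array m hm)]
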